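-- pv_equiv track=rewrite | github.com/ChoiBeomJun99/FinancialDevCT | 20230807/JeonghyunLEE/Algorithm_CH.py | solution
-- ===== SOURCE A (Python) =====
-- from collections import deque
--
-- def solution(progresses, speeds):
--     takes_days = deque()
--     answer = []
--     cnt = 1
--
--     for i, p in enumerate(progresses):
--         if (100 - p) % speeds[i]:
--             takes_days.append((100 - p) // speeds[i] + 1)
--         else:
--             takes_days.append((100 - p) // speeds[i])
--         try:
--             if takes_days[0] >= takes_days[1]:
--                 takes_days.pop()
--                 cnt += 1
--             else:
--                 answer.append(cnt)
--                 takes_days.popleft()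
--                 cnt = 1
--         except:
--             pass
--
--     answer.append(cnt)
--     return answer
-- ===== SOURCE B (Python) =====
-- def solution(progresses, speeds):
--     # remaining days per task, integer ceiling division
--     days = [-(-(100 - progresses[i]) // speeds[i]) for i in range(len(progresses))]
--     # a deployment starts at every index whose day strictly exceeds all earlier days
--     leaders = [i for i in range(len(days))
--                if all(days[k] < days[i] for k in range(i))]
--     # batch sizes are the gaps between consecutive deployment starts
--     return [e - s for s, e in zip(leaders, leaders[1:] + [len(days)])]
-- ===== Notes on version B (the rewrite author's own statement) =====
-- stated objective: alternative
-- what changed: B computes deployment start positions globally (indices whose day strictly exceeds every earlier day, by comprehension) and returns the gaps between consecutive start positions, instead of A's sequential deque/counter grouping loop.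
-- intended difference: On empty progresses A returns [1] (the loop never runs but the initial counter is still appended), B returns [], which is intended since zero tasks yield zero deployments. — e.g. on solution([], []): A returns [1], B returns []
import Mathlib
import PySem

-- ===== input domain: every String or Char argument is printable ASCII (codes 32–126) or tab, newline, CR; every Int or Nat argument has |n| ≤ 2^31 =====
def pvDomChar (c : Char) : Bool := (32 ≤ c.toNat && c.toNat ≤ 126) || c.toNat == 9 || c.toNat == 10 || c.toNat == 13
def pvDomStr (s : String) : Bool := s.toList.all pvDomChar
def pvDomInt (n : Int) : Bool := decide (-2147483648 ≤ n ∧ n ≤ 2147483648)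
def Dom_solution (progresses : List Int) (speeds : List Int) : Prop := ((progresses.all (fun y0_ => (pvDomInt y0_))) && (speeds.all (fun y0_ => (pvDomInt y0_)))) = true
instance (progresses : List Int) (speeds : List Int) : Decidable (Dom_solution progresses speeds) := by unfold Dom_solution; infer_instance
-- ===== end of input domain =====

-- B drops A's sequential deque/counter loop: it lists the deployment start positions globally
-- (indices whose day beats every earlier day) and returns the gaps between consecutive starts
-- (objective: alternative).

-- ===== PORT A =====
-- one body of A's for-loop; the deque `takes_days` is a List Int (append at the back,
-- pop = dropLast, popleft = tail); the try/except IndexError is the wildcard match arm.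
-- speeds[i]: Pre_solution excludes the IndexError (pyGet? = none), so .getD 0 is exact there.
def solutionStep (speeds : List Int) (st : List Int × List Int × Int) (ip : Int × Int) :
    List Int × List Int × Int :=
  let s := (PySem.List.pyGet? speeds ip.1).getD 0
  let d := if PySem.Int.mod (100 - ip.2) s ≠ 0 then PySem.Int.floordiv (100 - ip.2) s + 1
           else PySem.Int.floordiv (100 - ip.2) s
  let td := st.1 ++ [d]
  match td with
  | t0 :: t1 :: _ =>
      if t0 ≥ t1 then (td.dropLast, st.2.1, st.2.2 + 1)
      else (td.tail, st.2.1 ++ [st.2.2], 1)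
  | _ => (td, st.2.1, st.2.2)

def solution (progresses : List Int) (speeds : List Int) : List Int :=
  let st := (PySem.List.enumerate progresses 0).foldl (solutionStep speeds) ([], [], 1)
  st.2.1 ++ [st.2.2]

-- ===== PORT B =====
-- the days comprehension of Source B: ceil via -(-(100-p)//speeds[i]), i over range(len(progresses))
def altDays (progresses : List Int) (speeds : List Int) : List Int :=
  (PySem.List.pyRange 0 (progresses.length : Int) 1).map
    (fun i => -(PySem.Int.floordiv (-(100 - (PySem.List.pyGet? progresses i).getD 0))
        ((PySem.List.pyGet? speeds i).getD 0)))

-- the leaders comprehension of Source B: indices whose day beats all earlier days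
def altLeaders (days : List Int) : List Int :=
  (PySem.List.pyRange 0 (days.length : Int) 1).filter
    (fun i => (PySem.List.pyRange 0 i 1).all
      (fun k => decide ((PySem.List.pyGet? days k).getD 0 < (PySem.List.pyGet? days i).getD 0)))

def solution_alt (progresses : List Int) (speeds : List Int) : List Int :=
  let days := altDays progresses speeds
  let leaders := altLeaders days
  (leaders.zip (PySem.List.slice leaders (some 1) none ++ [(days.length : Int)])).map
    (fun se => se.2 - se.1)

-- ===== PRECONDITION & SPEC =====
-- A raises IndexError when speeds is shorter than progresses and ZeroDivisionError on a zero
-- speed among the used ones; Pre_ excludes exactly those inputs (B raises there too).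
def Pre_solution (progresses : List Int) (speeds : List Int) : Prop :=
  progresses.length ≤ speeds.length ∧ ∀ s ∈ speeds.take progresses.length, s ≠ 0
instance (progresses : List Int) (speeds : List Int) : Decidable (Pre_solution progresses speeds) := by
  unfold Pre_solution; infer_instance
def pvWitness_solution : List Int × List Int := ([93, 30, 55], [1, 30, 5])

-- On empty progresses A returns [1] (the loop never runs but the initial counter is still
-- appended), B returns [], which is intended since zero tasks yield zero deployments.
def D_solution (progresses : List Int) (speeds : List Int) : Prop := progresses = []
instance (progresses : List Int) (speeds : List Int) : Decidable (D_solution progresses speeds) := by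
  unfold D_solution; infer_instance

def Spec_solution (progresses : List Int) (speeds : List Int) (out : List Int) : Prop := ¬ D_solution progresses speeds → out = solution_alt progresses speeds
instance (progresses : List Int) (speeds : List Int) (out : List Int) : Decidable (Spec_solution progresses speeds out) := by unfold Spec_solution; infer_instance

def pvDiffWitness_solution : List Int × List Int := ([], [])
def pvDiffWitnessOut_solution : (List Int) × (List Int) := ([1], [])

-- ===== CLAIM (what is proved, stated in full; the proofs are below) =====
def Claim_unchanged_solution : Prop := ∀ (progresses : List Int) (speeds : List Int), Dom_solution progresses speeds → Pre_solution progresses speeds → Spec_solution progresses speeds (solution progresses speeds)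
def Claim_changed_solution : Prop := Dom_solution (pvDiffWitness_solution.1) (pvDiffWitness_solution.2) ∧ Pre_solution (pvDiffWitness_solution.1) (pvDiffWitness_solution.2) ∧ D_solution (pvDiffWitness_solution.1) (pvDiffWitness_solution.2) ∧ solution (pvDiffWitness_solution.1) (pvDiffWitness_solution.2) = pvDiffWitnessOut_solution.1 ∧ solution_alt (pvDiffWitness_solution.1) (pvDiffWitness_solution.2) = pvDiffWitnessOut_solution.2 ∧ pvDiffWitnessOut_solution.1 ≠ pvDiffWitnessOut_solution.2
def Claim_exact_solution : Prop := ∀ (progresses : List Int) (speeds : List Int), Dom_solution progresses speeds → Pre_solution progresses speeds → D_solution progresses speeds → solution progresses speeds ≠ solution_alt progresses speeds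

-- ===== LEMMAS AND PROOFS =====

-- A's branchy floor-division ceiling equals B's -(-x // s), for every nonzero divisor.
theorem ceil_eq (x s : Int) (hs : s ≠ 0) :
    (if PySem.Int.mod x s ≠ 0 then PySem.Int.floordiv x s + 1 else PySem.Int.floordiv x s)
      = -(PySem.Int.floordiv (-x) s) := by
  have h1 := PySem.Int.floordiv_mul_add_mod x s
  have h2 := PySem.Int.floordiv_mul_add_mod (-x) s
  rcases lt_or_gt_of_ne hs with h | h
  · have b1 := PySem.Int.mod_neg_bounds x h
    have b2 := PySem.Int.mod_neg_bounds (-x) h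
    generalize hq1 : PySem.Int.floordiv x s = q1 at h1 ⊢
    generalize hq2 : PySem.Int.floordiv (-x) s = q2 at h2 ⊢
    generalize hr1 : PySem.Int.mod x s = r1 at h1 b1 ⊢
    generalize hr2 : PySem.Int.mod (-x) s = r2 at h2 b2
    have key : (q1 + q2) * s = -(r1 + r2) := by linear_combination h1 + h2
    obtain ⟨k, hk⟩ : s ∣ (r1 + r2) := ⟨-(q1 + q2), by linear_combination key⟩
    have hk0 : 0 ≤ k := by nlinarith [b1.2, b2.2]
    have hk2 : k < 2 := by nlinarith [b1.1, b2.1]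
    have hcases : r1 + r2 = 0 ∨ r1 + r2 = s := by interval_cases k <;> omega
    have hzero : r1 + r2 = 0 → q1 + q2 = 0 := by
      intro hc
      have hm : (q1 + q2) * s = 0 := by rw [key, hc]; ring
      exact (mul_eq_zero.mp hm).resolve_right hs
    have hone : r1 + r2 = s → q1 + q2 = -1 := by
      intro hc
      have hm : (q1 + q2) * s = (-1) * s := by rw [key, hc]; ring
      exact mul_right_cancel₀ hs hm
    split
    · rename_i hne
      have : r1 + r2 = s := by omega
      have := hone this; omega
    · rename_i hne
      have : r1 + r2 = 0 := by omega
      have := hzero this; omega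
  · have b1 := PySem.Int.mod_nonneg x h
    have b2 := PySem.Int.mod_lt x h
    have b3 := PySem.Int.mod_nonneg (-x) h
    have b4 := PySem.Int.mod_lt (-x) h
    generalize hq1 : PySem.Int.floordiv x s = q1 at h1 ⊢
    generalize hq2 : PySem.Int.floordiv (-x) s = q2 at h2 ⊢
    generalize hr1 : PySem.Int.mod x s = r1 at h1 b1 b2 ⊢
    generalize hr2 : PySem.Int.mod (-x) s = r2 at h2 b3 b4
    have key : (q1 + q2) * s = -(r1 + r2) := by linear_combination h1 + h2
    obtain ⟨k, hk⟩ : s ∣ (r1 + r2) := ⟨-(q1 + q2), by linear_combination key⟩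
    have hk0 : 0 ≤ k := by nlinarith
    have hk2 : k < 2 := by nlinarith
    have hcases : r1 + r2 = 0 ∨ r1 + r2 = s := by interval_cases k <;> omega
    have hzero : r1 + r2 = 0 → q1 + q2 = 0 := by
      intro hc
      have hm : (q1 + q2) * s = 0 := by rw [key, hc]; ring
      exact (mul_eq_zero.mp hm).resolve_right hs
    have hone : r1 + r2 = s → q1 + q2 = -1 := by
      intro hc
      have hm : (q1 + q2) * s = (-1) * s := by rw [key, hc]; ring
      exact mul_right_cancel₀ hs hm
    split
    · rename_i hne
      have : r1 + r2 = s := by omega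
      have := hone this; omega
    · rename_i hne
      have : r1 + r2 = 0 := by omega
      have := hzero this; omega

-- A's step, written on the precomputed day (used to refold A over the days list)
def stepA' (st : List Int × List Int × Int) (d : Int) : List Int × List Int × Int :=
  let td := st.1 ++ [d]
  match td with
  | t0 :: t1 :: _ =>
      if t0 ≥ t1 then (td.dropLast, st.2.1, st.2.2 + 1)
      else (td.tail, st.2.1 ++ [st.2.2], 1)
  | _ => (td, st.2.1, st.2.2)

-- a scalar form of A's step: state (answer, current batch leader, counter)
def stepS (st : List Int × Int × Int) (d : Int) : List Int × Int × Int :=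
  if d > st.2.1 then (st.1 ++ [st.2.2], d, 1) else (st.1, st.2.1, st.2.2 + 1)

-- the canonical grouping both loops compute
def groups (c cnt : Int) : List Int → List Int
  | [] => [cnt]
  | d :: rest => if d > c then cnt :: groups d 1 rest else groups c (cnt + 1) rest

-- relative leader positions of a suffix, given the running maximum c so far
def lead (c : Int) : List Int → List Int
  | [] => []
  | x :: xs => if x > c then 0 :: (lead x xs).map (· + 1) else (lead c xs).map (· + 1)

-- pairwise differences: pdiffs a l n = consecutive gaps of (a :: l) closed off by n
def pdiffs (a : Int) : List Int → Int → List Int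
  | [], n => [n - a]
  | b :: t, n => (b - a) :: pdiffs b t n

-- refold: A's loop over enumerate = stepA' folded over A's day values
theorem foldA_refold (speeds : List Int) (l : List (Int × Int)) (st : List Int × List Int × Int) :
    l.foldl (solutionStep speeds) st =
      (l.map (fun ip =>
        let s := (PySem.List.pyGet? speeds ip.1).getD 0
        if PySem.Int.mod (100 - ip.2) s ≠ 0 then PySem.Int.floordiv (100 - ip.2) s + 1
        else PySem.Int.floordiv (100 - ip.2) s)).foldl stepA' st := by
  rw [List.foldl_map]
  rfl

-- the deque loop with a one-element deque equals the scalar loop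
theorem loop_eq (l : List Int) (c : Int) (ans : List Int) (cnt : Int) :
    l.foldl stepA' ([c], ans, cnt) =
      ([(l.foldl stepS (ans, c, cnt)).2.1],
       (l.foldl stepS (ans, c, cnt)).1,
       (l.foldl stepS (ans, c, cnt)).2.2) := by
  induction l generalizing c ans cnt with
  | nil => rfl
  | cons d rest ih =>
      simp only [List.foldl_cons]
      by_cases h : c ≥ d
      · have hs : stepA' ([c], ans, cnt) d = ([c], ans, cnt + 1) := by simp [stepA', h]
        have ht : stepS (ans, c, cnt) d = (ans, c, cnt + 1) := by simp [stepS]; omega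
        rw [hs, ht, ih]
      · have hs : stepA' ([c], ans, cnt) d = ([d], ans ++ [cnt], 1) := by simp [stepA', h]
        have ht : stepS (ans, c, cnt) d = (ans ++ [cnt], d, 1) := by simp [stepS]; omega
        rw [hs, ht, ih]

-- the scalar loop computes `groups`
theorem scalar_groups (l : List Int) (ans : List Int) (c cnt : Int) :
    (l.foldl stepS (ans, c, cnt)).1 ++ [(l.foldl stepS (ans, c, cnt)).2.2]
      = ans ++ groups c cnt l := by
  induction l generalizing ans c cnt with
  | nil => rfl
  | cons d rest ih =>
      simp only [List.foldl_cons, groups]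
      by_cases h : d > c
      · simp only [stepS, if_pos h, ih, List.append_assoc, List.singleton_append, if_pos h]
      · simp only [stepS, if_neg h, ih, if_neg h]

-- the predicate of B's leaders comprehension, named for the proofs
def leadP (L : List Int) (i : Int) : Bool :=
  (PySem.List.pyRange 0 i 1).all
    (fun k => decide ((PySem.List.pyGet? L k).getD 0 < (PySem.List.pyGet? L i).getD 0))

-- B's leaders filter with an extra threshold c, over an arbitrary suffix
def leadF (c : Int) (L : List Int) : List Int :=
  (PySem.List.pyRange 0 (L.length : Int) 1).filter
    (fun i => decide (c < (PySem.List.pyGet? L i).getD 0) && leadP L i)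

-- the range-shift identity used to peel the head off B's comprehensions
theorem pyRange_zero_succ (n : Nat) :
    PySem.List.pyRange 0 ((n : Int) + 1) 1 = 0 :: (PySem.List.pyRange 0 (n : Int) 1).map (· + 1) := by
  apply List.ext_getElem
  · simp [PySem.List.length_pyRange_one]
  · intro i h1 h2
    cases i with
    | zero => simp [PySem.List.getElem_pyRange_one]
    | succ j =>
        simp [PySem.List.getElem_pyRange_one]

theorem get_cons_succ (d : Int) (L : List Int) (k : Nat) :
    (PySem.List.pyGet? (d :: L) ((k : Int) + 1)).getD 0 = (PySem.List.pyGet? L (k : Int)).getD 0 := by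
  have : ((k : Int) + 1) = ((k + 1 : Nat) : Int) := by push_cast; ring
  rw [this, PySem.List.pyGet?_natCast, PySem.List.pyGet?_natCast, List.getElem?_cons_succ]

theorem get_zero_cons (d : Int) (L : List Int) :
    (PySem.List.pyGet? (d :: L) 0).getD 0 = d := by
  have : (0 : Int) = ((0 : Nat) : Int) := rfl
  rw [this, PySem.List.pyGet?_natCast]
  rfl

-- leadP characterized propositionally at a natural index
theorem leadP_iff (L : List Int) (k : Nat) :
    leadP L (k : Int) = true ↔
      ∀ m : Nat, m < k →
        (PySem.List.pyGet? L (m : Int)).getD 0 < (PySem.List.pyGet? L (k : Int)).getD 0 := by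
  unfold leadP
  rw [List.all_eq_true]
  constructor
  · intro h m hm
    have hmem : (m : Int) ∈ PySem.List.pyRange 0 (k : Int) 1 := by
      rw [PySem.List.mem_pyRange_one]
      constructor <;> [positivity; exact_mod_cast hm]
    simpa using h _ hmem
  · intro h i hi
    rw [PySem.List.mem_pyRange_one] at hi
    lift i to ℕ using hi.1 with m
    have hm : m < k := by exact_mod_cast hi.2
    simpa using h m hm

theorem leadP_zero (L : List Int) : leadP L 0 = true := by
  unfold leadP
  rw [PySem.List.pyRange_one_eq_nil le_rfl]
  rfl

theorem leadP_cons_succ (x : Int) (xs : List Int) (k : Nat) :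
    leadP (x :: xs) ((k : Int) + 1) =
      (decide (x < (PySem.List.pyGet? xs (k : Int)).getD 0) && leadP xs (k : Int)) := by
  rw [Bool.eq_iff_iff]
  have hcast : ((k : Int) + 1) = ((k + 1 : Nat) : Int) := by push_cast; ring
  rw [hcast, leadP_iff, Bool.and_eq_true, decide_eq_true_iff, leadP_iff]
  constructor
  · intro h
    refine ⟨?_, ?_⟩
    · have h0 := h 0 (Nat.succ_pos k)
      rw [← hcast, get_cons_succ, Nat.cast_zero, get_zero_cons] at h0
      exact h0
    · intro m hm
      have hms := h (m + 1) (by omega)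
      rw [show ((m + 1 : Nat) : Int) = (m : Int) + 1 by push_cast; ring, get_cons_succ] at hms
      rw [← hcast, get_cons_succ] at hms
      exact hms
  · rintro ⟨h0, hs⟩ m hm
    rw [← hcast, get_cons_succ]
    cases m with
    | zero => rw [Nat.cast_zero, get_zero_cons]; exact h0
    | succ j =>
        rw [show ((j + 1 : Nat) : Int) = (j : Int) + 1 by push_cast; ring, get_cons_succ]
        exact hs j (by omega)

-- peel the head index off a filtered range
theorem filter_shift (n : Nat) (p : Int → Bool) :
    (PySem.List.pyRange 0 ((n : Int) + 1) 1).filter p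
      = (if p 0 then [0] else []) ++
          ((PySem.List.pyRange 0 (n : Int) 1).filter (fun i => p (i + 1))).map (· + 1) := by
  rw [pyRange_zero_succ, List.filter_cons, List.filter_map]
  by_cases h0 : p 0 <;> simp [h0, Function.comp_def]

-- the filtered comprehension satisfies the recursion of `lead`
theorem leadF_cons (c x : Int) (xs : List Int) :
    leadF c (x :: xs)
      = (if c < x then [0] else []) ++ (leadF (if c < x then x else c) xs).map (· + 1) := by
  unfold leadF
  rw [show (((x :: xs).length : Nat) : Int) = ((xs.length : Nat) : Int) + 1 by
        rw [List.length_cons]; push_cast; ring,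
      filter_shift]
  have hhead : (decide (c < (PySem.List.pyGet? (x :: xs) 0).getD 0) && leadP (x :: xs) 0)
      = decide (c < x) := by
    rw [get_zero_cons, leadP_zero, Bool.and_true]
  rw [hhead]
  have hfil : ((PySem.List.pyRange 0 ((xs.length : Nat) : Int) 1).filter
        (fun i => decide (c < (PySem.List.pyGet? (x :: xs) (i + 1)).getD 0) && leadP (x :: xs) (i + 1)))
      = ((PySem.List.pyRange 0 ((xs.length : Nat) : Int) 1).filter
        (fun i => decide ((if c < x then x else c) < (PySem.List.pyGet? xs i).getD 0) && leadP xs i)) := by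
    apply List.filter_congr
    intro i hi
    rw [PySem.List.mem_pyRange_one] at hi
    lift i to ℕ using hi.1 with k
    rw [get_cons_succ, leadP_cons_succ]
    rw [Bool.eq_iff_iff]
    simp only [Bool.and_eq_true, decide_eq_true_iff]
    by_cases hcx : c < x <;> simp only [if_pos, if_neg, hcx, if_true, if_false] <;> constructor
    · rintro ⟨_, hx, hl⟩; exact ⟨hx, hl⟩
    · rintro ⟨hx, hl⟩; exact ⟨lt_trans hcx hx, hx, hl⟩
    · rintro ⟨hc, _, hl⟩; exact ⟨hc, hl⟩
    · rintro ⟨hc, hl⟩; exact ⟨hc, lt_of_le_of_lt (not_lt.mp hcx) hc, hl⟩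
  rw [hfil]
  by_cases hcx : c < x <;> simp [hcx]

theorem leadF_eq_lead (xs : List Int) (c : Int) : leadF c xs = lead c xs := by
  induction xs generalizing c with
  | nil =>
      unfold leadF lead
      rw [show ((([] : List Int).length : Nat) : Int) = 0 by rfl,
          PySem.List.pyRange_one_eq_nil le_rfl]
      rfl
  | cons x t ih =>
      rw [leadF_cons, lead]
      by_cases h : c < x
      · rw [if_pos h, if_pos h, ih, if_pos (show x > c from h)]
        rfl
      · rw [if_neg h, if_neg h, ih, if_neg (show ¬ x > c from h)]
        rfl

-- B's leaders comprehension computes `lead` (with index 0 prepended) on a nonempty days list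
theorem altLeaders_cons (d : Int) (rest : List Int) :
    altLeaders (d :: rest) = 0 :: (lead d rest).map (· + 1) := by
  unfold altLeaders
  rw [show (((d :: rest).length : Nat) : Int) = ((rest.length : Nat) : Int) + 1 by
        rw [List.length_cons]; push_cast; ring,
      filter_shift]
  have hhead : ((PySem.List.pyRange 0 (0 : Int) 1).all
      (fun k => decide ((PySem.List.pyGet? (d :: rest) k).getD 0 < (PySem.List.pyGet? (d :: rest) 0).getD 0)))
      = true := by
    rw [PySem.List.pyRange_one_eq_nil le_rfl]
    rfl
  rw [hhead]
  have hfil : ((PySem.List.pyRange 0 ((rest.length : Nat) : Int) 1).filter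
        (fun i => (PySem.List.pyRange 0 (i + 1) 1).all
          (fun k => decide ((PySem.List.pyGet? (d :: rest) k).getD 0
            < (PySem.List.pyGet? (d :: rest) (i + 1)).getD 0))))
      = leadF d rest := by
    unfold leadF
    apply List.filter_congr
    intro i hi
    rw [PySem.List.mem_pyRange_one] at hi
    lift i to ℕ using hi.1 with k
    exact leadP_cons_succ d rest k
  rw [hfil, leadF_eq_lead]
  rfl

-- B's zip-of-gaps computes `pdiffs`
theorem zip_diffs (l : List Int) (a n : Int) :
    (((a :: l).zip (PySem.List.slice (a :: l) (some 1) none ++ [n])).map (fun se => se.2 - se.1))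
      = pdiffs a l n := by
  rw [PySem.List.slice_from_one]
  induction l generalizing a with
  | nil => rfl
  | cons b t ih => simpa [pdiffs] using ih b

-- gaps of leader positions are the batch sizes
theorem pdiffs_lead (xs : List Int) (c a cnt : Int) :
    pdiffs a ((lead c xs).map (· + (a + cnt))) (a + cnt + xs.length) = groups c cnt xs := by
  induction xs generalizing c a cnt with
  | nil => simp [lead, pdiffs, groups]
  | cons x t ih =>
      simp only [lead, groups]
      by_cases h : x > c
      · simp only [if_pos h, List.map_cons, List.map_map]
        have hm : ((fun y => y + (a + cnt)) ∘ (fun y => y + 1)) = (fun y => y + ((a + cnt) + 1)) := by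
          funext y; simp; ring
        rw [hm]
        simp only [pdiffs, zero_add]
        have hN : a + cnt + (((x :: t).length : Nat) : Int) = (a + cnt) + 1 + ((t.length : Nat) : Int) := by
          rw [List.length_cons]; push_cast; ring
        have h1 : a + cnt - a = cnt := by ring
        rw [hN, h1, ih]
      · simp only [if_neg h, List.map_map]
        have hm : ((fun y => y + (a + cnt)) ∘ (fun y => y + 1)) = (fun y => y + (a + (cnt + 1))) := by
          funext y; simp; ring
        rw [hm]
        have hN : a + cnt + (((x :: t).length : Nat) : Int) = a + (cnt + 1) + ((t.length : Nat) : Int) := by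
          rw [List.length_cons]; push_cast; ring
        rw [hN, ih]

-- getElem form of enumerate, for the pointwise days comparison
theorem enum_getElem (xs : List Int) (s : Int) (i : Nat)
    (h : i < (PySem.List.enumerate xs s).length) :
    (PySem.List.enumerate xs s)[i]
      = (s + (i : Int), xs[i]'(by simpa [PySem.List.length_enumerate] using h)) := by
  induction xs generalizing s i with
  | nil => simp [PySem.List.enumerate] at h
  | cons x t ih =>
      simp only [PySem.List.enumerate_cons]
      cases i with
      | zero => simp
      | succ j =>
          simp only [List.getElem_cons_succ]
          rw [ih]
          simp only [Prod.mk.injEq, List.getElem_cons_succ]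
          constructor
          · push_cast; ring
          · trivial

-- under Pre_, A's day values (over enumerate) are exactly B's days list
theorem days_eq (progresses speeds : List Int) (hpre : Pre_solution progresses speeds) :
    (PySem.List.enumerate progresses 0).map (fun ip =>
        let s := (PySem.List.pyGet? speeds ip.1).getD 0
        if PySem.Int.mod (100 - ip.2) s ≠ 0 then PySem.Int.floordiv (100 - ip.2) s + 1
        else PySem.Int.floordiv (100 - ip.2) s)
      = altDays progresses speeds := by
  apply List.ext_getElem
  · simp [PySem.List.length_enumerate, altDays, PySem.List.length_pyRange_one]
  · intro i h1 h2
    have hi : i < progresses.length := by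
      simpa [PySem.List.length_enumerate] using h1
    have his : i < speeds.length := lt_of_lt_of_le hi hpre.1
    rw [List.getElem_map, enum_getElem]
    unfold altDays
    rw [List.getElem_map, PySem.List.getElem_pyRange_one, zero_add]
    rw [PySem.List.pyGet?_natCast, PySem.List.pyGet?_natCast,
        List.getElem?_eq_getElem hi, List.getElem?_eq_getElem his]
    have hs : speeds[i] ≠ 0 := by
      apply hpre.2
      rw [List.mem_take_iff_getElem]
      exact ⟨i, by omega, by simp⟩
    simpa using ceil_eq (100 - progresses[i]) speeds[i] hs

-- ===== VERDICT (by name: the statement is the Claim_ definition above) =====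
theorem solution_spec : Claim_unchanged_solution := by
  intro progresses speeds _ hpre hD
  show solution progresses speeds = solution_alt progresses speeds
  unfold solution solution_alt
  rw [foldA_refold, days_eq progresses speeds hpre]
  cases hA : altDays progresses speeds with
  | nil =>
      exfalso
      apply hD
      show progresses = []
      cases progresses with
      | nil => rfl
      | cons a as =>
          have hlen := congrArg List.length hA
          simp [altDays, PySem.List.length_pyRange_one] at hlen
  | cons d rest =>
      simp only [List.foldl_cons]
      have h1 : stepA' (([] : List Int), ([] : List Int), (1 : Int)) d = ([d], [], 1) := rfl
      rw [h1, loop_eq]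
      simp only []
      rw [scalar_groups, List.nil_append, altLeaders_cons, zip_diffs]
      have hlen : (((d :: rest).length : Nat) : Int) = 0 + 1 + ((rest.length : Nat) : Int) := by
        rw [List.length_cons]; push_cast; ring
      have hmap : ((lead d rest).map (· + 1)) = ((lead d rest).map (· + (0 + 1))) := by
        simp
      rw [hlen, hmap, pdiffs_lead]

theorem solution_changed : Claim_changed_solution := by unfold Claim_changed_solution; decide

theorem solution_tight : Claim_exact_solution := by
  intro progresses speeds _ _ hD
  have hD' : progresses = [] := hD
  subst hD'
  simp [solution, solution_alt, altDays, altLeaders, PySem.List.enumerate]
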